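-- pv_equiv track=rewrite | github.com/Kiriti-aajad/SQL_GENERATOR | agent/schema_searcher/engines/nlp_engine.py | _find_common_patterns
-- ===== SOURCE A (Python) =====
-- from typing import List, Dict, Any, Optional
--
-- def _find_common_patterns(items: List[str], pattern_type: str) -> List[str]:
--     """Find common prefixes or suffixes in column names"""
--     patterns = {}
--     min_length = 3
--
--     for item in items:
--         if len(item) < min_length:
--             continue
--
--         if pattern_type == 'prefix':
--             for i in range(min_length, min(len(item) + 1, 8)):
--                 pattern = item[:i]
--                 patterns[pattern] = patterns.get(pattern, 0) + 1
--         elif pattern_type == 'suffix':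
--             for i in range(min_length, min(len(item) + 1, 8)):
--                 pattern = item[-i:]
--                 patterns[pattern] = patterns.get(pattern, 0) + 1
--
--     # Return patterns that appear in at least 2 items
--     return [pattern for pattern, count in patterns.items() if count >= 2]
-- ===== SOURCE B (Python) =====
-- def _find_common_patterns(items, pattern_type):
--     """Find common prefixes or suffixes in column names (membership-scan re-implementation)."""
--     if pattern_type == 'prefix':
--         cut, matches = (lambda it, i: it[:i]), str.startswith
--     elif pattern_type == 'suffix':
--         cut, matches = (lambda it, i: it[-i:]), str.endswith
--     else:
--         return []
--     seen = set()
--     result = []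
--     for item in items:
--         for i in range(3, min(len(item), 7) + 1):
--             p = cut(item, i)
--             if p not in seen:
--                 seen.add(p)
--                 if sum(1 for it in items if matches(it, p)) >= 2:
--                     result.append(p)
--     return result
-- ===== Notes on version B (the rewrite author's own statement) =====
-- stated objective: alternative
-- what changed: Replaces the counting dict (hash-count every substring, then filter counts >= 2) with a first-occurrence scan: each new pattern is tested directly by counting how many items start/end with it, so no pattern->count map is ever built.
import Mathlib
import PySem

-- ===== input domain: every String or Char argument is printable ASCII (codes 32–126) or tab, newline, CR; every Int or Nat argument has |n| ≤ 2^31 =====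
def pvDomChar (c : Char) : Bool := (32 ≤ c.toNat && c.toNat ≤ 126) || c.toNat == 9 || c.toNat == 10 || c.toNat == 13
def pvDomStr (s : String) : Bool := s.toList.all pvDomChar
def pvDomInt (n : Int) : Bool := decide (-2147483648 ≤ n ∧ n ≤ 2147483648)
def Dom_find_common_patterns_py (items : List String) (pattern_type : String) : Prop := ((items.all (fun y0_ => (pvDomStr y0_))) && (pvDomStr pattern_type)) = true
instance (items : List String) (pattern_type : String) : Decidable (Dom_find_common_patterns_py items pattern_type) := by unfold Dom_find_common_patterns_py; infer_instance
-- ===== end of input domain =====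

-- B replaces A's counting dict (hash-count every prefix/suffix, then filter counts >= 2) with a
-- first-occurrence scan that tests each new pattern directly by counting the items that start/end
-- with it (objective: alternative algorithm, no pattern->count map).


-- ===== PORT A =====
def find_common_patterns_py (items : List String) (pattern_type : String) : List String :=
  let patterns := items.foldl (fun (patterns : PySem.Dict String Int) item =>
    if PySem.Str.len item < 3 then patterns
    else if pattern_type == "prefix" then
      (PySem.List.pyRange 3 (min (PySem.Str.len item + 1) 8) 1).foldl
        (fun patterns i =>
          let pattern := PySem.Str.slice item none (some i)
          patterns.insert pattern (patterns.getD pattern 0 + 1)) patterns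
    else if pattern_type == "suffix" then
      (PySem.List.pyRange 3 (min (PySem.Str.len item + 1) 8) 1).foldl
        (fun patterns i =>
          let pattern := PySem.Str.slice item (some (-i)) none
          patterns.insert pattern (patterns.getD pattern 0 + 1)) patterns
    else patterns) PySem.Dict.empty
  (patterns.items.filter (fun pc => decide ((2:Int) <= pc.2))).map (fun pc => pc.1)

-- ===== PORT B =====
-- B-side helper: the shared scan loop of Source B (cut = how a pattern is cut out, hits = does an item carry it)
def pvRunScan (items : List String) (cut : String -> Int -> String) (hits : String -> String -> Bool) : List String :=
  (items.foldl (fun (st : PySem.Set String × List String) item =>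
      (PySem.List.pyRange 3 (min (PySem.Str.len item) 7 + 1) 1).foldl (fun st i =>
        let p := cut item i
        if PySem.Set.contains st.1 p then st
        else (PySem.Set.add st.1 p,
              if (2:Int) <= items.foldl (fun acc it => acc + (if hits it p then (1:Int) else 0)) 0
              then st.2 ++ [p] else st.2)) st)
    (PySem.Set.empty, [])).2

def find_common_patterns_py_alt (items : List String) (pattern_type : String) : List String :=
  if pattern_type == "prefix" then
    pvRunScan items (fun it i => PySem.Str.slice it none (some i)) (fun it p => PySem.Str.startswith it p)
  else if pattern_type == "suffix" then
    pvRunScan items (fun it i => PySem.Str.slice it (some (-i)) none) (fun it p => PySem.Str.endswith it p)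
  else []

-- ===== PRECONDITION & SPEC =====
def Spec_find_common_patterns_py (items : List String) (pattern_type : String) (out : List String) : Prop := out = find_common_patterns_py_alt items pattern_type
instance (items : List String) (pattern_type : String) (out : List String) : Decidable (Spec_find_common_patterns_py items pattern_type out) := by unfold Spec_find_common_patterns_py; infer_instance

-- ===== CLAIM (what is proved, stated in full; the proofs are below) =====
def Claim_equal_find_common_patterns_py : Prop := ∀ (items : List String) (pattern_type : String), Dom_find_common_patterns_py items pattern_type → Spec_find_common_patterns_py items pattern_type (find_common_patterns_py items pattern_type)

-- ===== LEMMAS AND PROOFS =====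

def pvR (it : String) : List Int := PySem.List.pyRange 3 (min (PySem.Str.len it + 1) 8) 1

def pvStream (items : List String) (cut : String → Int → String) : List String :=
  items.flatMap (fun it => (pvR it).map (cut it))

def pvCnt (items : List String) (hits : String → String → Bool) (p : String) : Int :=
  items.foldl (fun acc it => acc + (if hits it p then (1:Int) else 0)) 0

def pvStep (items : List String) (hits : String → String → Bool)
    (st : PySem.Set String × List String) (p : String) : PySem.Set String × List String :=
  if PySem.Set.contains st.1 p then st
  else (PySem.Set.add st.1 p, if (2:Int) ≤ pvCnt items hits p then st.2 ++ [p] else st.2)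

def pvEmit (items : List String) (hits : String → String → Bool) :
    List String → PySem.Set String → List String
  | [], _ => []
  | p :: rest, s =>
    if PySem.Set.contains s p then pvEmit items hits rest s
    else (if (2:Int) ≤ pvCnt items hits p then [p] else []) ++ pvEmit items hits rest (PySem.Set.add s p)

lemma pvRange_nil {b : Int} (h : b ≤ 3) : PySem.List.pyRange 3 b 1 = [] := by
  rw [PySem.List.pyRange_of_pos 3 b (by norm_num), if_neg (by omega : ¬ (3:Int) < b)]
  simp

lemma pvR_alt (it : String) :
    PySem.List.pyRange 3 (min (PySem.Str.len it) 7 + 1) 1 = pvR it := by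
  unfold pvR; congr 1; omega

lemma pvR_len (it : String) {i : Int} (h : i ∈ pvR it) :
    3 ≤ i ∧ i ≤ 7 ∧ i ≤ (it.toList.length : Int) := by
  unfold pvR at h
  rw [PySem.List.mem_pyRange_one] at h
  have hl := PySem.Str.len_eq it
  omega

lemma pvR_mem (it : String) {i : Int} (h3 : 3 ≤ i) (h7 : i ≤ 7)
    (hL : i ≤ (it.toList.length : Int)) : i ∈ pvR it := by
  unfold pvR
  rw [PySem.List.mem_pyRange_one]
  have hl := PySem.Str.len_eq it
  omega

lemma cutP_toList (it : String) {i : Int} (h : i ∈ pvR it) :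
    (PySem.Str.slice it none (some i)).toList = it.toList.take i.toNat := by
  obtain ⟨h3, -, -⟩ := pvR_len it h
  rw [PySem.Str.toList_slice, PySem.Chars.slice_eq_listSlice, PySem.List.slice_to _ (by omega)]

lemma cutS_toList (it : String) {i : Int} (h : i ∈ pvR it) :
    (PySem.Str.slice it (some (-i)) none).toList = it.toList.drop (it.toList.length - i.toNat) := by
  obtain ⟨h3, -, -⟩ := pvR_len it h
  have hi : i = ((i.toNat : Nat) : Int) := by omega
  rw [PySem.Str.toList_slice, PySem.Chars.slice_eq_listSlice, hi,
    PySem.List.slice_from_neg_natCast _ _ (by omega)]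
  congr 2

lemma shape_P (items : List String) {p : String}
    (h : p ∈ pvStream items (fun it i => PySem.Str.slice it none (some i))) :
    3 ≤ p.toList.length ∧ p.toList.length ≤ 7 := by
  unfold pvStream at h
  simp only [List.mem_flatMap, List.mem_map] at h
  obtain ⟨it, -, i, hi, rfl⟩ := h
  obtain ⟨h3, h7, hL⟩ := pvR_len it hi
  rw [cutP_toList it hi, List.length_take]
  omega

lemma shape_S (items : List String) {p : String}
    (h : p ∈ pvStream items (fun it i => PySem.Str.slice it (some (-i)) none)) :
    3 ≤ p.toList.length ∧ p.toList.length ≤ 7 := by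
  unfold pvStream at h
  simp only [List.mem_flatMap, List.mem_map] at h
  obtain ⟨it, -, i, hi, rfl⟩ := h
  obtain ⟨h3, h7, hL⟩ := pvR_len it hi
  rw [cutS_toList it hi, List.length_drop]
  omega

lemma count_pvR (it : String) {m : Int} (h3 : 3 ≤ m) (h7 : m ≤ 7)
    (hL : m ≤ (it.toList.length : Int)) : List.count m (pvR it) = 1 := by
  apply List.count_eq_one_of_mem
  · unfold pvR; exact PySem.List.nodup_pyRange_one _ _
  · exact pvR_mem it h3 h7 hL

lemma item_count_P (it p : String) (h3 : 3 ≤ p.toList.length) (h7 : p.toList.length ≤ 7) :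
    List.count p ((pvR it).map ((fun it i => PySem.Str.slice it none (some i)) it))
      = if PySem.Str.startswith it p then 1 else 0 := by
  rw [List.count_eq_countP, List.countP_map]
  by_cases hs : PySem.Str.startswith it p = true
  · rw [if_pos hs]
    have hpre : p.toList <+: it.toList := by
      rw [PySem.Str.startswith_eq] at hs
      exact (PySem.Chars.startswith_iff _ _).1 hs
    have hmL : p.toList.length ≤ it.toList.length := hpre.length_le
    have htake : it.toList.take p.toList.length = p.toList :=
      (List.prefix_iff_eq_take.1 hpre).symm
    have hcongr : List.countP ((fun s => s == p) ∘ fun i => PySem.Str.slice it none (some i)) (pvR it)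
        = List.countP (fun i => i == (p.toList.length : Int)) (pvR it) := by
      apply List.countP_congr
      intro i hi
      obtain ⟨hi3, hi7, hiL⟩ := pvR_len it hi
      simp only [Function.comp_apply, beq_iff_eq]
      constructor
      · intro he
        have ht := congrArg String.toList he
        rw [cutP_toList it hi] at ht
        have hlen := congrArg List.length ht
        rw [List.length_take] at hlen
        omega
      · intro he
        apply String.toList_inj.mp
        rw [cutP_toList it hi, htake.symm]
        congr 1
        omega
    rw [hcongr, ← List.count_eq_countP]
    exact count_pvR it (by omega) (by omega) (by omega)
  · rw [if_neg hs, List.countP_eq_zero]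
    intro i hi
    simp only [Function.comp_apply, beq_iff_eq]
    intro he
    apply hs
    have ht := congrArg String.toList he
    rw [cutP_toList it hi] at ht
    rw [PySem.Str.startswith_eq]
    apply (PySem.Chars.startswith_iff _ _).2
    rw [← ht]
    exact List.take_prefix _ _

lemma item_count_S (it p : String) (h3 : 3 ≤ p.toList.length) (h7 : p.toList.length ≤ 7) :
    List.count p ((pvR it).map ((fun it i => PySem.Str.slice it (some (-i)) none) it))
      = if PySem.Str.endswith it p then 1 else 0 := by
  rw [List.count_eq_countP, List.countP_map]
  by_cases hs : PySem.Str.endswith it p = true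
  · rw [if_pos hs]
    have hsuf : p.toList <:+ it.toList := by
      rw [PySem.Str.endswith_eq] at hs
      exact (PySem.Chars.endswith_iff _ _).1 hs
    have hmL : p.toList.length ≤ it.toList.length := hsuf.length_le
    have hdrop : it.toList.drop (it.toList.length - p.toList.length) = p.toList :=
      (List.suffix_iff_eq_drop.1 hsuf).symm
    have hcongr : List.countP ((fun s => s == p) ∘ fun i => PySem.Str.slice it (some (-i)) none) (pvR it)
        = List.countP (fun i => i == (p.toList.length : Int)) (pvR it) := by
      apply List.countP_congr
      intro i hi
      obtain ⟨hi3, hi7, hiL⟩ := pvR_len it hi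
      simp only [Function.comp_apply, beq_iff_eq]
      constructor
      · intro he
        have ht := congrArg String.toList he
        rw [cutS_toList it hi] at ht
        have hlen := congrArg List.length ht
        rw [List.length_drop] at hlen
        omega
      · intro he
        apply String.toList_inj.mp
        rw [cutS_toList it hi, hdrop.symm]
        congr 2
        omega
    rw [hcongr, ← List.count_eq_countP]
    exact count_pvR it (by omega) (by omega) (by omega)
  · rw [if_neg hs, List.countP_eq_zero]
    intro i hi
    simp only [Function.comp_apply, beq_iff_eq]
    intro he
    apply hs
    have ht := congrArg String.toList he
    rw [cutS_toList it hi] at ht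
    rw [PySem.Str.endswith_eq]
    apply (PySem.Chars.endswith_iff _ _).2
    rw [← ht]
    exact List.drop_suffix _ _

lemma count_stream (items : List String) (cut : String → Int → String)
    (hits : String → String → Bool)
    (hitem : ∀ it p, 3 ≤ p.toList.length → p.toList.length ≤ 7 →
      List.count p ((pvR it).map (cut it)) = if hits it p then 1 else 0)
    {p : String} (h3 : 3 ≤ p.toList.length) (h7 : p.toList.length ≤ 7) :
    List.count p (pvStream items cut) = List.countP (fun it => hits it p) items := by
  unfold pvStream
  rw [List.count_flatMap]
  induction items with
  | nil => simp
  | cons it rest ih =>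
    simp only [List.map_cons, List.sum_cons, List.countP_cons, Function.comp_apply]
    rw [hitem it p h3 h7, ih]
    split <;> omega

lemma pvCnt_eq (items : List String) (hits : String → String → Bool) (p : String) :
    pvCnt items hits p = (List.countP (fun it => hits it p) items : Int) := by
  unfold pvCnt
  rw [PySem.List.foldl_add, PySem.List.sum_map_ite_one_zero]
  simp

lemma A_fold_eq (items : List String) (cut : String → Int → String) :
    items.foldl (fun d it => if PySem.Str.len it < 3 then d
        else (pvR it).foldl (fun d i => d.insert (cut it i) (d.getD (cut it i) 0 + 1)) d)
      PySem.Dict.empty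
    = PySem.Dict.counter (pvStream items cut) := by
  unfold pvStream
  rw [← PySem.Dict.foldl_insert_getD_add_one_eq_counter, List.foldl_flatMap]
  congr 1
  funext d it
  rw [List.foldl_map]
  by_cases h : PySem.Str.len it < 3
  · rw [if_pos h]
    have hlen := PySem.Str.len_eq it
    have hnil : pvR it = [] := by unfold pvR; exact pvRange_nil (by omega)
    rw [hnil]
    rfl
  · rw [if_neg h]

lemma counter_out (stream : List String) :
    ((PySem.Dict.counter stream).items.filter (fun pc => decide ((2:Int) ≤ pc.2))).map Prod.fst
    = (PySem.Set.ofList stream).filter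
        (fun p => decide ((2:Int) ≤ (List.count p stream : Int))) := by
  rw [PySem.Dict.items_counter, List.filter_map, List.map_map]
  have h1 : (Prod.fst ∘ fun k => (k, (List.count k stream : Int))) = id := by funext k; rfl
  rw [h1, List.map_id]
  rfl

lemma B_foldl (items : List String) (cut : String → Int → String)
    (hits : String → String → Bool) :
    pvRunScan items cut hits
      = (List.foldl (pvStep items hits) (PySem.Set.empty, ([] : List String))
          (pvStream items cut)).2 := by
  unfold pvRunScan pvStream
  rw [List.foldl_flatMap]
  have hF : (fun (st : PySem.Set String × List String) item =>
        (PySem.List.pyRange 3 (min (PySem.Str.len item) 7 + 1) 1).foldl (fun st i =>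
          let p := cut item i
          if PySem.Set.contains st.1 p then st
          else (PySem.Set.add st.1 p,
                if (2:Int) ≤ items.foldl (fun acc it => acc + (if hits it p then (1:Int) else 0)) 0
                then st.2 ++ [p] else st.2)) st)
      = fun (st : PySem.Set String × List String) it =>
          List.foldl (pvStep items hits) st ((pvR it).map (cut it)) := by
    funext st it
    rw [List.foldl_map, pvR_alt]
    rfl
  rw [hF]

lemma foldl_step_snd (items : List String) (hits : String → String → Bool) :
    ∀ (l : List String) (s : PySem.Set String) (acc : List String),
      (List.foldl (pvStep items hits) (s, acc) l).2 = acc ++ pvEmit items hits l s := by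
  intro l
  induction l with
  | nil => intro s acc; simp [pvEmit]
  | cons p rest ih =>
    intro s acc
    rw [List.foldl_cons]
    by_cases hc : PySem.Set.contains s p = true
    · simp only [pvStep, pvEmit, hc, if_true]
      exact ih s acc
    · simp only [pvStep, pvEmit, hc, if_false, Bool.false_eq_true]
      rw [ih]
      split <;> simp

lemma contains_false_of_not_mem {s : PySem.Set String} {p : String} (h : p ∉ s) :
    PySem.Set.contains s p = false := by
  rw [PySem.Set.contains_eq_decide]
  simpa using h

lemma filter_discard (S : List String) (p : String) (q : String → Bool) (hq : q p = false) :
    (PySem.Set.discard S p).filter q = S.filter q := by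
  show (S.filter (fun y => !(y == p))).filter q = S.filter q
  rw [List.filter_filter]
  apply List.filter_congr
  intro a _
  by_cases hap : a = p
  · subst hap; simp [hq]
  · simp [hap]

lemma filter_add (s : PySem.Set String) (X : List String) (p : String) :
    X.filter (fun a => !PySem.Set.contains (PySem.Set.add s p) a)
      = (PySem.Set.discard X p).filter (fun a => !PySem.Set.contains s a) := by
  show _ = (X.filter (fun y => !(y == p))).filter (fun a => !PySem.Set.contains s a)
  rw [List.filter_filter]
  apply List.filter_congr
  intro a _
  rw [PySem.Set.contains_eq_decide, PySem.Set.contains_eq_decide]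
  by_cases hap : a = p
  · subst hap; simp [PySem.Set.mem_add]
  · by_cases has : a ∈ s <;> simp [PySem.Set.mem_add, has, hap]

lemma emit_eq (items : List String) (hits : String → String → Bool) :
    ∀ (l : List String) (s : PySem.Set String),
      pvEmit items hits l s
        = ((PySem.Set.ofList l).filter (fun p => !PySem.Set.contains s p)).filter
            (fun p => decide ((2:Int) ≤ pvCnt items hits p)) := by
  intro l
  induction l with
  | nil => intro s; simp [pvEmit, PySem.Set.ofList_nil]
  | cons p rest ih =>
    intro s
    rw [PySem.Set.ofList_cons, List.filter_cons]
    by_cases hm : p ∈ s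
    · have hc : PySem.Set.contains s p = true := (PySem.Set.contains_iff s p).2 hm
      have hcf : (!PySem.Set.contains s p) = false := by rw [hc]; rfl
      simp only [pvEmit, hc, if_true]
      rw [ih]
      simp only [Bool.not_true, Bool.false_eq_true, if_false]
      rw [filter_discard (PySem.Set.ofList rest) p _ hcf]
    · have hc : PySem.Set.contains s p = false := contains_false_of_not_mem hm
      have hct : (!PySem.Set.contains s p) = true := by rw [hc]; rfl
      simp only [pvEmit, hc, Bool.false_eq_true, if_false]
      rw [ih, filter_add s (PySem.Set.ofList rest) p]
      simp only [Bool.not_false, if_true]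
      rw [List.filter_cons]
      by_cases hcnt : (2:Int) ≤ pvCnt items hits p <;> simp [hcnt]

lemma main_generic (items : List String) (cut : String → Int → String)
    (hits : String → String → Bool)
    (hitem : ∀ it p, 3 ≤ p.toList.length → p.toList.length ≤ 7 →
      List.count p ((pvR it).map (cut it)) = if hits it p then 1 else 0)
    (hshape : ∀ p ∈ pvStream items cut, 3 ≤ p.toList.length ∧ p.toList.length ≤ 7) :
    ((PySem.Dict.counter (pvStream items cut)).items.filter
        (fun pc => decide ((2:Int) ≤ pc.2))).map Prod.fst
      = pvRunScan items cut hits := by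
  rw [counter_out, B_foldl, foldl_step_snd, List.nil_append, emit_eq]
  have hemp : (PySem.Set.ofList (pvStream items cut)).filter
        (fun p => !PySem.Set.contains (PySem.Set.empty : PySem.Set String) p)
      = PySem.Set.ofList (pvStream items cut) := by
    apply List.filter_eq_self.2
    intro a _
    have : a ∉ (PySem.Set.empty : PySem.Set String) := by
      simp [PySem.Set.empty]
    rw [contains_false_of_not_mem this]
    rfl
  rw [hemp]
  apply List.filter_congr
  intro p hp
  have hps := hshape p ((PySem.Set.mem_ofList _ _).1 hp)
  rw [pvCnt_eq, count_stream items cut hits hitem hps.1 hps.2]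

lemma A_prefix (items : List String) :
    find_common_patterns_py items "prefix"
      = ((PySem.Dict.counter (pvStream items (fun it i => PySem.Str.slice it none (some i)))).items.filter
          (fun pc => decide ((2:Int) ≤ pc.2))).map Prod.fst := by
  unfold find_common_patterns_py
  rw [← A_fold_eq items (fun it i => PySem.Str.slice it none (some i))]
  simp only [pvR]
  rfl

lemma A_suffix (items : List String) :
    find_common_patterns_py items "suffix"
      = ((PySem.Dict.counter (pvStream items (fun it i => PySem.Str.slice it (some (-i)) none))).items.filter
          (fun pc => decide ((2:Int) ≤ pc.2))).map Prod.fst := by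
  unfold find_common_patterns_py
  rw [← A_fold_eq items (fun it i => PySem.Str.slice it (some (-i)) none)]
  simp only [pvR]
  rfl

lemma A_other (items : List String) (pt : String) (h1 : pt ≠ "prefix") (h2 : pt ≠ "suffix") :
    find_common_patterns_py items pt = [] := by
  unfold find_common_patterns_py
  have hb1 : (pt == "prefix") = false := by simpa using h1
  have hb2 : (pt == "suffix") = false := by simpa using h2
  simp only [hb1, hb2, Bool.false_eq_true, if_false, ite_self]
  rw [List.foldl_fixed]
  rfl

-- ===== VERDICT (by name: the statement is the Claim_ definition above) =====
theorem find_common_patterns_py_spec : Claim_equal_find_common_patterns_py := by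
  intro items pattern_type _
  unfold Spec_find_common_patterns_py find_common_patterns_py_alt
  by_cases hp : pattern_type = "prefix"
  · subst hp
    simp only [BEq.rfl, if_true]
    rw [A_prefix]
    exact main_generic items _ _ item_count_P (fun p hp => shape_P items hp)
  · by_cases hs : pattern_type = "suffix"
    · subst hs
      have hb : (("suffix" : String) == "prefix") = false := by decide
      simp only [hb, Bool.false_eq_true, if_false, BEq.rfl, if_true]
      rw [A_suffix]
      exact main_generic items _ _ item_count_S (fun p hp => shape_S items hp)
    · have hb1 : (pattern_type == "prefix") = false := by simpa using hp
      have hb2 : (pattern_type == "suffix") = false := by simpa using hs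
      simp only [hb1, hb2, Bool.false_eq_true, if_false]
      exact A_other items pattern_type hp hs
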